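-- pv_equiv track=rewrite | github.com/AlyssaLytle/comp283 | lib/slide_format_helpers.py | _add_div
-- ===== SOURCE A (Python) =====
-- def _has_div(slide: str) -> bool:
--     """If a slide has a div box in it already, don't add any."""
--     return ("div" in slide)
--
-- def _add_div(slide: str) -> bool:
--     "Puts text of slide in div box"
--     new_slide = ""
--     slide_list = slide.split("\n")
--     new_slide += slide_list[0] + "\n"
--     if not _has_div(slide):
--         div_str = '<div id="content">\n'
--         new_slide += div_str
--     for s in slide_list[1:]:
--         new_slide += s + "\n"
--     if not _has_div(slide):
--         new_slide += "</div>\n\n\n"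
--     return new_slide
-- ===== SOURCE B (Python) =====
-- def _has_div(slide: str) -> bool:
--     """If a slide has a div box in it already, don't add any."""
--     return ("div" in slide)
--
-- def _add_div(slide):
--     "Puts text of slide in div box"
--     out = slide + "\n"
--     if _has_div(slide):
--         return out
--     j = out.find("\n")
--     return out[:j + 1] + '<div id="content">\n' + out[j + 1:] + "</div>\n\n\n"
-- ===== Notes on version B (the rewrite author's own statement) =====
-- stated objective: simpler
-- what changed: B drops the split-into-lines-and-rejoin loop entirely: it observes that the loop reconstructs the slide plus a trailing newline, so it appends one newline and, when a div must be added, splices the two tags around the first newline located with str.find.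
import Mathlib
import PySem

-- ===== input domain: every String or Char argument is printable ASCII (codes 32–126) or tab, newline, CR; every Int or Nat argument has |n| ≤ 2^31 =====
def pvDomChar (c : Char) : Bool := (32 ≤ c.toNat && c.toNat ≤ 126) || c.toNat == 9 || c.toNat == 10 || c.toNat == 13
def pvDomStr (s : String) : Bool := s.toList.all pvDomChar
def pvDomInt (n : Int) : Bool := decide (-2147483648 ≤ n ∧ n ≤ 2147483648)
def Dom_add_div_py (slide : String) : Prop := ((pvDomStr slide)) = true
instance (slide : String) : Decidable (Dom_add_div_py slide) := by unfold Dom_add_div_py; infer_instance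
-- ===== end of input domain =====

-- B replaces A's split-into-lines-and-rejoin loop by one str.find and two slices; objective: simpler.

-- ===== PORT A =====
-- helper _has_div
def has_div_py (slide : String) : Bool := PySem.Str.isIn "div" slide

def add_div_py (slide : String) : String :=
  let slide_list := PySem.Chars.splitOn slide.toList ['\n']
  -- slide_list[0]: splitOn never returns an empty list, so headI is exact here
  let new_slide : List Char := [] ++ slide_list.headI ++ ['\n']
  let new_slide := if !(has_div_py slide) then new_slide ++ "<div id=\"content\">\n".toList else new_slide
  let new_slide := (PySem.List.slice slide_list (some 1) none).foldl
      (fun acc s => acc ++ (s ++ ['\n'])) new_slide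
  let new_slide := if !(has_div_py slide) then new_slide ++ "</div>\n\n\n".toList else new_slide
  String.ofList new_slide

-- ===== PORT B =====
def add_div_py_alt (slide : String) : String :=
  let out := slide.toList ++ ['\n']
  if has_div_py slide then String.ofList out
  else
    let j := PySem.Chars.find out ['\n']
    String.ofList (PySem.Chars.slice out none (some (j + 1)) ++ "<div id=\"content\">\n".toList
      ++ PySem.Chars.slice out (some (j + 1)) none ++ "</div>\n\n\n".toList)

-- ===== PRECONDITION & SPEC =====
def Spec_add_div_py (slide : String) (out : String) : Prop := out = add_div_py_alt slide
instance (slide : String) (out : String) : Decidable (Spec_add_div_py slide out) := by unfold Spec_add_div_py; infer_instance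

-- ===== CLAIM (what is proved, stated in full; the proofs are below) =====
def Claim_equal_add_div_py : Prop := ∀ (slide : String), Dom_add_div_py slide → Spec_add_div_py slide (add_div_py slide)

-- ===== LEMMAS AND PROOFS =====

-- reference single-char split on '\n'
def nlSplit : List Char → List (List Char)
  | [] => [[]]
  | c :: rest =>
    if c = '\n' then [] :: nlSplit rest
    else
      match nlSplit rest with
      | [] => [[c]]            -- unreachable: nlSplit never returns []
      | h :: tl => (c :: h) :: tl

theorem nlSplit_ne_nil (cs : List Char) : nlSplit cs ≠ [] := by
  cases cs with
  | nil => simp [nlSplit]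
  | cons c rest =>
    simp only [nlSplit]
    split
    · simp
    · split <;> simp

theorem splitOn_go_eq (fuel : Nat) (l cur : List Char) (acc : List (List Char))
    (h : l.length < fuel) :
    PySem.Chars.splitOn.go ['\n'] fuel l cur acc
      = acc.reverse ++ (cur.reverse ++ (nlSplit l).headI) :: (nlSplit l).tail := by
  induction fuel generalizing l cur acc with
  | zero => omega
  | succ fuel ih =>
    cases l with
    | nil =>
      rw [PySem.Chars.splitOn.go.eq_def]
      simp [nlSplit]
    | cons c rest =>
      rw [PySem.Chars.splitOn.go.eq_3]
      simp only [List.length_cons] at h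
      by_cases hc : c = '\n'
      · subst hc
        rw [if_pos (by simp [List.isPrefixOf])]
        rw [ih _ _ _ (by simp; omega)]
        cases hS : nlSplit rest with
        | nil => exact absurd hS (nlSplit_ne_nil rest)
        | cons hd tl => simp [nlSplit, hS]
      · rw [if_neg (by simp [List.isPrefixOf]; exact fun h => hc h.symm)]
        rw [ih _ _ _ (by omega)]
        cases hS : nlSplit rest with
        | nil => exact absurd hS (nlSplit_ne_nil rest)
        | cons hd tl => simp [nlSplit, hc, hS]

theorem splitOn_eq_nlSplit (cs : List Char) :
    PySem.Chars.splitOn cs ['\n'] = nlSplit cs := by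
  show PySem.Chars.splitOn.go ['\n'] (cs.length + 1) cs [] [] = _
  rw [splitOn_go_eq _ _ _ _ (by omega)]
  cases hS : nlSplit cs with
  | nil => exact absurd hS (nlSplit_ne_nil cs)
  | cons hd tl => simp

theorem headI_nlSplit (cs : List Char) :
    (nlSplit cs).headI = cs.takeWhile (fun c => !(c == '\n')) := by
  induction cs with
  | nil => simp [nlSplit]
  | cons c rest ih =>
    simp only [nlSplit]
    by_cases hc : c = '\n'
    · simp [hc]
    · cases hS : nlSplit rest with
      | nil => exact absurd hS (nlSplit_ne_nil rest)
      | cons hd tl =>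
        rw [hS] at ih
        simp_all

-- the reconstruction lemma: first piece + '\n' + (each later piece + '\n') = cs + '\n'
theorem nlSplit_reconstruct (cs : List Char) :
    (nlSplit cs).headI ++ '\n' :: ((nlSplit cs).tail.flatMap (fun s => s ++ ['\n']))
      = cs ++ ['\n'] := by
  induction cs with
  | nil => simp [nlSplit]
  | cons c rest ih =>
    simp only [nlSplit]
    by_cases hc : c = '\n'
    · subst hc
      cases hS : nlSplit rest with
      | nil => exact absurd hS (nlSplit_ne_nil rest)
      | cons hd tl =>
        rw [hS] at ih
        simpa [List.flatMap_cons] using ih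
    · cases hS : nlSplit rest with
      | nil => exact absurd hS (nlSplit_ne_nil rest)
      | cons hd tl =>
        rw [hS] at ih
        simp_all

theorem singleton_prefix_iff (a : Char) (l : List Char) :
    [a] <+: l ↔ l.head? = some a := by
  cases l with
  | nil => simp
  | cons b t => simp [List.cons_prefix_cons, eq_comm]

theorem find_newline (t u : List Char) (ht : '\n' ∉ t) :
    PySem.Chars.find (t ++ '\n' :: u) ['\n'] = (t.length : Int) := by
  have hinf : ['\n'] <:+: t ++ '\n' :: u := ⟨t, u, by simp⟩
  have h0 : 0 ≤ PySem.Chars.find (t ++ '\n' :: u) ['\n'] :=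
    (PySem.Chars.find_nonneg_iff _ _).mpr hinf
  obtain ⟨hpre, hmin⟩ := PySem.Chars.find_spec h0
  set n := (PySem.Chars.find (t ++ '\n' :: u) ['\n']).toNat with hn
  have hle : n ≤ t.length := by
    by_contra hgt
    exact hmin t.length (by omega)
      (by rw [List.drop_left]; simp)
  have heq : n = t.length := by
    rcases Nat.lt_or_ge n t.length with hlt | hge
    · exfalso
      rw [singleton_prefix_iff, List.head?_drop, List.getElem?_append_left hlt,
          List.getElem?_eq_getElem hlt] at hpre
      have : t[n] = '\n' := Option.some.inj hpre
      exact ht (this ▸ List.getElem_mem hlt)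
    · omega
  omega

theorem foldl_append_newline (L : List (List Char)) (init : List Char) :
    L.foldl (fun acc s => acc ++ (s ++ ['\n'])) init
      = init ++ L.flatMap (fun s => s ++ ['\n']) := by
  induction L generalizing init with
  | nil => simp
  | cons h tl ih => simp [List.foldl_cons, ih, List.flatMap_cons]

-- ===== VERDICT (by name: the statement is the Claim_ definition above) =====
theorem add_div_py_spec : Claim_equal_add_div_py := by
  intro slide _
  show add_div_py slide = add_div_py_alt slide
  unfold add_div_py add_div_py_alt
  set cs := slide.toList with hcs
  have hrec := nlSplit_reconstruct cs
  by_cases hdiv : has_div_py slide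
  · simp only [hdiv, Bool.not_true, if_true, splitOn_eq_nlSplit,
      PySem.List.slice_from _ (by norm_num : (0:Int) ≤ 1), Int.toNat_one, List.drop_one,
      foldl_append_newline]
    congr 1
    simpa using hrec
  · simp only [hdiv, Bool.not_false, if_true, splitOn_eq_nlSplit,
      PySem.List.slice_from _ (by norm_num : (0:Int) ≤ 1), Int.toNat_one, List.drop_one,
      foldl_append_newline]
    set t := (nlSplit cs).headI with hT
    set F := (nlSplit cs).tail.flatMap (fun s => s ++ ['\n']) with hF
    have hout : cs ++ ['\n'] = (t ++ ['\n']) ++ F := by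
      rw [← hrec]; simp
    have hnt : '\n' ∉ t := by
      rw [hT, headI_nlSplit]
      intro hm
      have := List.mem_takeWhile_imp hm
      simp at this
    have hfind : PySem.Chars.find (cs ++ ['\n']) ['\n'] = (t.length : Int) := by
      rw [hout]
      simpa using find_newline t F hnt
    rw [hfind]
    have h1 : ((t.length : Int) + 1) = ((t.length + 1 : Nat) : Int) := by push_cast; ring
    rw [h1, PySem.Chars.slice_eq_listSlice, PySem.Chars.slice_eq_listSlice,
        PySem.List.slice_to _ (by positivity), PySem.List.slice_from _ (by positivity)]
    rw [Int.toNat_natCast, hout]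
    have hlen : t.length + 1 = (t ++ ['\n']).length := by simp
    rw [hlen, List.take_left, List.drop_left]
    simp
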